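-- pv_equiv track=rewrite | github.com/MrBrantCode/unitest_baseline | mut_generate/mist_train_cf/cf_87403/solution.py | is_valid_media_query
-- ===== SOURCE A (Python) =====
-- def is_valid_media_query(query):
--     # Check if the query starts with "@media"
--     if not query.startswith("@media "):
--         return False
--
--     # Remove the "@media " part from the query
--     query = query[7:]
--
--     # Split the query by "and" or "or"
--     query_parts = query.split(" and ") if " and " in query else query.split(" or ")
--
--     # Iterate over each query part
--     for part in query_parts:
--         # Split the part into media feature and value
--         feature, value = part.strip()[1:-1].split(":")
--         feature = feature.strip()
--         value = value.strip()
--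
--         # Check if the media feature and value are valid
--         if feature not in ["screen size", "orientation", "resolution", "device type"]:
--             return False
--         if feature == "screen size" and value not in ["small", "medium", "large"]:
--             return False
--         if feature == "orientation" and value not in ["portrait", "landscape"]:
--             return False
--         if feature == "resolution" and not value.replace("x", "").isdigit():
--             return False
--         if feature == "device type" and value not in ["mobile", "tablet", "desktop"]:
--             return False
--
--     return True
-- ===== SOURCE B (Python) =====
-- _RULES = {
--     "screen size": frozenset(("small", "medium", "large")),
--     "orientation": frozenset(("portrait", "landscape")),
--     "device type": frozenset(("mobile", "tablet", "desktop")),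
-- }
--
--
-- def _pair_ok(part):
--     inner = part.strip()[1:-1]
--     i = inner.find(":")
--     if i < 0:
--         return False
--     feature = inner[:i].strip()
--     value = inner[i + 1:].strip()
--     allowed = _RULES.get(feature)
--     if allowed is not None:
--         return value in allowed
--     if feature == "resolution":
--         return value.replace("x", "").isdigit()
--     return False
--
--
-- def is_valid_media_query(query):
--     if not query.startswith("@media "):
--         return False
--     body = query[7:]
--     sep = " and " if " and " in body else " or "
--     part = ""
--     i = 0
--     while i < len(body):
--         if body.startswith(sep, i):
--             if not _pair_ok(part):
--                 return False
--             part = ""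
--             i += len(sep)
--         else:
--             part += body[i]
--             i += 1
--     return _pair_ok(part)
-- ===== Notes on version B (the rewrite author's own statement) =====
-- stated objective: alternative
-- what changed: A splits the body into a list of parts and runs a five-branch if-cascade per part; B never builds the part list: it is a single-pass character scanner over the body (a startswith test at each index, an accumulator for the current part) that validates each part as soon as its separator is reached, extracting feature/value by first-colon index slicing instead of a colon split and judging the pair via a rules dict of frozensets, with resolution as the one special case.
-- outside the precondition, e.g. on is_valid_media_query('@media (foo)'): A raises ValueError, B returns False
-- crash fix: On queries with the media prefix where some part's stripped interior does not contain exactly one colon, A raises ValueError (tuple unpacking of the colon split); B returns False when there is no colon, else judges the pair split at the first colon. — e.g. on is_valid_media_query("@media (foo)"): A raises ValueError, B returns false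
import Mathlib
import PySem

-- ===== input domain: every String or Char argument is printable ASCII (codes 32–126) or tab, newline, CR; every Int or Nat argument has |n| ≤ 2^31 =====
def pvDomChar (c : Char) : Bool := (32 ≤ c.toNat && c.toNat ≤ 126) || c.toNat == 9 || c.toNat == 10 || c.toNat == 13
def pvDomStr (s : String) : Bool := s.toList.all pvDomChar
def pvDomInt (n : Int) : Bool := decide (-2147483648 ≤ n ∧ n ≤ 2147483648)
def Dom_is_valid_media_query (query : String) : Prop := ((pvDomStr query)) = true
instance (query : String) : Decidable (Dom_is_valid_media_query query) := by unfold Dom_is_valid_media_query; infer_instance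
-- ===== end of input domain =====

-- B replaces A's split-into-parts-then-cascade validation by a single-pass character
-- scanner over the body that validates each part as its separator is reached, using
-- first-colon index slicing and a rules table per part — alternative algorithm, same cost.


-- shared one-liner: both Pythons literally compute part.strip()[1:-1]
def pvInner (part : List Char) : List Char :=
  PySem.Chars.slice (PySem.Chars.strip part) (some 1) (some (-1))

-- ===== PORT A =====
-- the and/or split of A (also cited by Pre_/Raises_)
def pvPartsA (body : List Char) : List (List Char) :=
  if PySem.Chars.isIn " and ".toList body then PySem.Chars.splitOn body " and ".toList
  else PySem.Chars.splitOn body " or ".toList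

-- A's if-cascade over the already-stripped feature and value
def pvCheckA (feature value : List Char) : Bool :=
  if feature ∉ ["screen size".toList, "orientation".toList, "resolution".toList, "device type".toList] then
    false
  else if feature = "screen size".toList ∧ value ∉ ["small".toList, "medium".toList, "large".toList] then
    false
  else if feature = "orientation".toList ∧ value ∉ ["portrait".toList, "landscape".toList] then
    false
  else if feature = "resolution".toList ∧ ¬ PySem.Chars.strIsdigit (PySem.Chars.replace value ['x'] []) = true then
    false
  else if feature = "device type".toList ∧ value ∉ ["mobile".toList, "tablet".toList, "desktop".toList] then
    false
  else true

def pvLoopA : List (List Char) → Bool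
  | [] => true
  | part :: rest =>
    match PySem.Chars.splitOn (pvInner part) [':'] with
    | [f, v] =>
      if pvCheckA (PySem.Chars.strip f) (PySem.Chars.strip v) then pvLoopA rest else false
    | _ => false  -- Python raises ValueError (unpacking) here; such inputs are outside Pre_

def is_valid_media_query (query : String) : Bool :=
  if ¬ PySem.Chars.startswith query.toList "@media ".toList = true then false
  else pvLoopA (pvPartsA (PySem.Chars.slice query.toList (some 7) none))

-- ===== PORT B =====
def pvRules : PySem.Dict (List Char) (List (List Char)) :=
  PySem.Dict.ofList
    [("screen size".toList, ["small".toList, "medium".toList, "large".toList]),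
     ("orientation".toList, ["portrait".toList, "landscape".toList]),
     ("device type".toList, ["mobile".toList, "tablet".toList, "desktop".toList])]

-- B's per-part check: first-colon partition + rules-table lookup
def pvPairOkB (part : List Char) : Bool :=
  let inner := pvInner part
  let i := PySem.Chars.find inner [':']
  if i < 0 then false
  else
    let feature := PySem.Chars.strip (PySem.List.slice inner none (some i))
    let value := PySem.Chars.strip (PySem.List.slice inner (some (i + 1)) none)
    match PySem.Dict.get? pvRules feature with
    | some allowed => decide (value ∈ allowed)
    | none =>
      if feature = "resolution".toList then
        PySem.Chars.strIsdigit (PySem.Chars.replace value ['x'] [])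
      else false

-- B's scanner: walk the body once, accumulating the current part, validating it
-- whenever the (non-empty, passed head-and-tail) separator is matched at the cursor
def pvScanB (sep0 : Char) (sepRest : List Char) (l : List Char) (part : List Char) : Bool :=
  match l with
  | [] => pvPairOkB part
  | c :: rest =>
    if (sep0 :: sepRest).isPrefixOf (c :: rest) then
      pvPairOkB part && pvScanB sep0 sepRest (rest.drop sepRest.length) []
    else
      pvScanB sep0 sepRest rest (part ++ [c])
termination_by l.length
decreasing_by
  · simp only [List.length_cons, List.length_drop]; omega
  · simp only [List.length_cons]; omega

def is_valid_media_query_alt (query : String) : Bool :=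
  if PySem.Chars.startswith query.toList "@media ".toList then
    let body := PySem.Chars.slice query.toList (some 7) none
    if PySem.Chars.isIn " and ".toList body then pvScanB ' ' "and ".toList body []
    else pvScanB ' ' "or ".toList body []
  else false

-- ===== PRECONDITION & SPEC =====
-- Pre_ excludes exactly the queries on which A's per-part tuple unpacking of the colon
-- split raises ValueError (a part whose stripped interior does not split into exactly
-- two pieces); it is slightly narrower than A's domain, since A returns False before
-- reaching a malformed part that follows an already-invalid one (B returns False there too).
def Pre_is_valid_media_query (query : String) : Prop :=
  PySem.Chars.startswith query.toList "@media ".toList = true →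
    ∀ part ∈ pvPartsA (PySem.Chars.slice query.toList (some 7) none),
      (PySem.Chars.splitOn (pvInner part) [':']).length = 2
instance (query : String) : Decidable (Pre_is_valid_media_query query) := by
  unfold Pre_is_valid_media_query; infer_instance

def pvWitness_is_valid_media_query : String := "@media (orientation: portrait)"

-- On queries with the media prefix where some part's stripped interior does not split
-- into exactly two pieces at the colon A raises ValueError; B returns a Bool (False when
-- there is no colon, else the verdict on the pair split at the first colon).
def Raises_is_valid_media_query (query : String) : Prop :=
  PySem.Chars.startswith query.toList "@media ".toList = true ∧
    ∃ part ∈ pvPartsA (PySem.Chars.slice query.toList (some 7) none),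
      (PySem.Chars.splitOn (pvInner part) [':']).length ≠ 2
instance (query : String) : Decidable (Raises_is_valid_media_query query) := by
  unfold Raises_is_valid_media_query; infer_instance

def pvRaiseWitness_is_valid_media_query : String := "@media (foo)"
def pvRaiseWitnessOut_is_valid_media_query : Bool := false

def Spec_is_valid_media_query (query : String) (out : Bool) : Prop := out = is_valid_media_query_alt query
instance (query : String) (out : Bool) : Decidable (Spec_is_valid_media_query query out) := by
  unfold Spec_is_valid_media_query; infer_instance

-- ===== CLAIM (what is proved, stated in full; the proofs are below) =====
def Claim_equal_is_valid_media_query : Prop := ∀ (query : String), Dom_is_valid_media_query query → Pre_is_valid_media_query query → Spec_is_valid_media_query query (is_valid_media_query query)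

def Claim_raises_is_valid_media_query : Prop := (∀ (query : String), Dom_is_valid_media_query query → Raises_is_valid_media_query query → ¬ Pre_is_valid_media_query query) ∧ (Dom_is_valid_media_query (pvRaiseWitness_is_valid_media_query) ∧ Raises_is_valid_media_query (pvRaiseWitness_is_valid_media_query) ∧ is_valid_media_query_alt (pvRaiseWitness_is_valid_media_query) = pvRaiseWitnessOut_is_valid_media_query)

-- ===== LEMMAS AND PROOFS =====

-- proof-only view of Python's single-character split
def pvConsHead (p : List Char) : List (List Char) → List (List Char)
  | [] => [p]
  | h :: t => (p ++ h) :: t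

def pvCSplit (c : Char) : List Char → List (List Char)
  | [] => [[]]
  | x :: xs => if x = c then [] :: pvCSplit c xs else pvConsHead [x] (pvCSplit c xs)

theorem pvCSplit_ne_nil (c : Char) (l : List Char) : pvCSplit c l ≠ [] := by
  cases l with
  | nil => simp [pvCSplit]
  | cons x xs =>
    simp only [pvCSplit]
    split
    · simp
    · cases h : pvCSplit c xs <;> simp [pvConsHead]

theorem pvConsHead_consHead (p q : List Char) (ls : List (List Char)) :
    pvConsHead p (pvConsHead q ls) = pvConsHead (p ++ q) ls := by
  cases ls <;> simp [pvConsHead]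

theorem pv_go_csplit (c : Char) :
    ∀ (fuel : Nat) (l cur : List Char) (acc : List (List Char)), l.length < fuel →
      PySem.Chars.splitOn.go [c] fuel l cur acc = acc.reverse ++ pvConsHead cur.reverse (pvCSplit c l) := by
  intro fuel
  induction fuel with
  | zero => intro l cur acc h; omega
  | succ f ih =>
    intro l cur acc h
    cases l with
    | nil => simp [PySem.Chars.splitOn.go, pvCSplit, pvConsHead]
    | cons x xs =>
      by_cases hx : x = c
      · subst hx
        have hpre : [x].isPrefixOf (x :: xs) = true := by simp [List.isPrefixOf]
        rw [PySem.Chars.splitOn.go, if_pos hpre]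
        simp only [List.length_cons, List.length_nil, List.drop_succ_cons, List.drop_zero]
        rw [ih xs [] (cur.reverse :: acc) (by simp at h ⊢; omega)]
        cases hcs : pvCSplit x xs with
        | nil => exact absurd hcs (pvCSplit_ne_nil x xs)
        | cons h0 t0 =>
          simp [pvCSplit, hcs, pvConsHead]
      · have hpre : [c].isPrefixOf (x :: xs) = false := by
          simp [List.isPrefixOf]; exact fun h' => absurd h'.symm hx
        rw [PySem.Chars.splitOn.go, if_neg (by simp [hpre])]
        rw [ih xs (x :: cur) acc (by simp at h ⊢; omega)]
        simp [pvCSplit, if_neg hx, pvConsHead_consHead]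

theorem pv_splitOn_single (c : Char) (l : List Char) :
    PySem.Chars.splitOn l [c] = pvCSplit c l := by
  rw [PySem.Chars.splitOn, pv_go_csplit c (l.length + 1) l [] [] (by omega)]
  cases h : pvCSplit c l with
  | nil => exact absurd h (pvCSplit_ne_nil c l)
  | cons h0 t0 => simp [pvConsHead]

theorem pvCSplit_singleton (c : Char) (l v : List Char) (h : pvCSplit c l = [v]) :
    l = v ∧ c ∉ v := by
  induction l generalizing v with
  | nil =>
    simp [pvCSplit] at h
    simp [h]
  | cons x xs ih =>
    simp only [pvCSplit] at h
    by_cases hx : x = c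
    · rw [if_pos hx] at h
      have := pvCSplit_ne_nil c xs
      simp at h
      exact absurd h.2 this
    · rw [if_neg hx] at h
      cases hcs : pvCSplit c xs with
      | nil => exact absurd hcs (pvCSplit_ne_nil c xs)
      | cons h0 t0 =>
        rw [hcs] at h
        simp [pvConsHead] at h
        obtain ⟨hv, ht⟩ := h
        have := ih h0 (by rw [hcs, ht])
        constructor
        · rw [← hv, this.1]
        · rw [← hv]; simp [this.2]; exact fun hc => hx hc.symm
    
theorem pvCSplit_pair (c : Char) (l f v : List Char) (h : pvCSplit c l = [f, v]) :
    l = f ++ c :: v ∧ c ∉ f ∧ c ∉ v := by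
  induction l generalizing f v with
  | nil => simp [pvCSplit] at h
  | cons x xs ih =>
    simp only [pvCSplit] at h
    by_cases hx : x = c
    · rw [if_pos hx] at h
      simp at h
      obtain ⟨hf, hrest⟩ := h
      obtain ⟨h1, h2⟩ := pvCSplit_singleton c xs v hrest
      subst hx
      exact ⟨by simp [← hf, h1], by simp [hf], h2⟩
    · rw [if_neg hx] at h
      cases hcs : pvCSplit c xs with
      | nil => exact absurd hcs (pvCSplit_ne_nil c xs)
      | cons h0 t0 =>
        rw [hcs] at h
        simp [pvConsHead] at h
        obtain ⟨hf, ht⟩ := h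
        obtain ⟨hxs, hcf, hcv⟩ := ih h0 v (by rw [hcs, ht])
        refine ⟨by simp [← hf, hxs], ?_, hcv⟩
        simp [← hf, hcf]
        exact fun hc => hx hc.symm

theorem pv_find_colon (f v : List Char) (hf : ':' ∉ f) :
    PySem.Chars.find (f ++ ':' :: v) [':'] = (f.length : Int) := by
  set s := f ++ ':' :: v with hs
  have hinf : [':'] <:+: s := ⟨f, v, by simp [hs]⟩
  have h0 : 0 ≤ PySem.Chars.find s [':'] := (PySem.Chars.find_nonneg_iff s [':']).2 hinf
  obtain ⟨hpre, hmin⟩ := PySem.Chars.find_spec h0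
  set n := (PySem.Chars.find s [':']).toNat with hn
  have hgetn : s[n]? = some ':' := by
    have := List.head?_drop (l := s) (i := n)
    rcases hpre with ⟨t, ht⟩
    rw [← this, ← ht]; rfl
  have hle : n ≤ f.length := by
    by_contra hgt
    exact hmin f.length (by omega) (by rw [hs, List.drop_left]; exact ⟨v, rfl⟩)
  have heq : n = f.length := by
    rcases Nat.lt_or_ge n f.length with hlt | hge
    · exfalso
      have : s[n]? = f[n]? := by
        rw [hs]; exact List.getElem?_append_left hlt
      rw [this] at hgetn
      exact hf (List.mem_of_getElem? hgetn)
    · omega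
  rw [← Int.toNat_of_nonneg h0, ← hn, heq]

-- per part: under the exactly-two-pieces shape, B's first-colon partition + rules
-- lookup computes exactly A's cascade on the stripped pieces
theorem pv_pair_eq (part f v : List Char)
    (h : PySem.Chars.splitOn (pvInner part) [':'] = [f, v]) :
    pvPairOkB part = pvCheckA (PySem.Chars.strip f) (PySem.Chars.strip v) := by
  rw [pv_splitOn_single] at h
  obtain ⟨hin, hcf, hcv⟩ := pvCSplit_pair ':' (pvInner part) f v h
  have hfind : PySem.Chars.find (pvInner part) [':'] = (f.length : Int) := by
    rw [hin]; exact pv_find_colon f v hcf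
  have hnotlt : ¬ ((f.length : Int) < 0) := by omega
  have htake : PySem.List.slice (pvInner part) none (some (f.length : Int)) = f := by
    rw [PySem.List.slice_to _ (by omega), Int.toNat_natCast, hin, List.take_left]
  have hdrop : PySem.List.slice (pvInner part) (some ((f.length : Int) + 1)) none = v := by
    rw [PySem.List.slice_from _ (by omega), hin]
    have : ((f.length : Int) + 1).toNat = f.length + 1 := by omega
    rw [this, ← List.drop_drop, List.drop_left]
    simp
  simp only [pvPairOkB, hfind, if_neg hnotlt, htake, hdrop]
  -- case split on the stripped feature against the rules table / A's cascade
  generalize PySem.Chars.strip f = F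
  generalize PySem.Chars.strip v = V
  have hit : pvRules.items =
      [("screen size".toList, ["small".toList, "medium".toList, "large".toList]),
       ("orientation".toList, ["portrait".toList, "landscape".toList]),
       ("device type".toList, ["mobile".toList, "tablet".toList, "desktop".toList])] := by decide
  by_cases h1 : F = "screen size".toList
  · subst h1
    have hg : pvRules.get? "screen size".toList
        = some ["small".toList, "medium".toList, "large".toList] := by decide
    rw [hg]; simp [pvCheckA]
  · by_cases h2 : F = "orientation".toList
    · subst h2
      have hg : pvRules.get? "orientation".toList
          = some ["portrait".toList, "landscape".toList] := by decide
      rw [hg]; simp [pvCheckA]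
    · by_cases h3 : F = "device type".toList
      · subst h3
        have hg : pvRules.get? "device type".toList
            = some ["mobile".toList, "tablet".toList, "desktop".toList] := by decide
        rw [hg]; simp [pvCheckA]
      · have hb1 : ((['s', 'c', 'r', 'e', 'e', 'n', ' ', 's', 'i', 'z', 'e'] : List Char) == F) = false := beq_eq_false_iff_ne.mpr (Ne.symm h1)
        have hb2 : ((['o', 'r', 'i', 'e', 'n', 't', 'a', 't', 'i', 'o', 'n'] : List Char) == F) = false := beq_eq_false_iff_ne.mpr (Ne.symm h2)
        have hb3 : ((['d', 'e', 'v', 'i', 'c', 'e', ' ', 't', 'y', 'p', 'e'] : List Char) == F) = false := beq_eq_false_iff_ne.mpr (Ne.symm h3)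
        have hget : PySem.Dict.get? pvRules F = none := by
          simp [PySem.Dict.get?, hit, List.find?, hb1, hb2, hb3]
        rw [hget]
        by_cases h4 : F = "resolution".toList
        · subst h4; simp [pvCheckA]
        · have h1l : ¬ F = (['s', 'c', 'r', 'e', 'e', 'n', ' ', 's', 'i', 'z', 'e'] : List Char) := h1
          have h2l : ¬ F = (['o', 'r', 'i', 'e', 'n', 't', 'a', 't', 'i', 'o', 'n'] : List Char) := h2
          have h3l : ¬ F = (['d', 'e', 'v', 'i', 'c', 'e', ' ', 't', 'y', 'p', 'e'] : List Char) := h3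
          have h4l : ¬ F = (['r', 'e', 's', 'o', 'l', 'u', 't', 'i', 'o', 'n'] : List Char) := h4
          simp [pvCheckA, h1l, h2l, h3l, h4l]

-- A's loop equals the pointwise conjunction of B's per-part check, given the shape
theorem pv_loop_eq (parts : List (List Char))
    (h : ∀ part ∈ parts, (PySem.Chars.splitOn (pvInner part) [':']).length = 2) :
    pvLoopA parts = parts.all pvPairOkB := by
  induction parts with
  | nil => rfl
  | cons part rest ih =>
    have hp := h part (by simp)
    have hrest : ∀ p ∈ rest, (PySem.Chars.splitOn (pvInner p) [':']).length = 2 := by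
      intro p hp'; exact h p (by simp [hp'])
    match hpieces : PySem.Chars.splitOn (pvInner part) [':'] with
    | [f, v] =>
      rw [List.all_cons, pv_pair_eq part f v hpieces, ← ih hrest]
      simp only [pvLoopA, hpieces]
      split <;> simp_all
    | [] => simp [hpieces] at hp
    | [_] => simp [hpieces] at hp
    | _ :: _ :: _ :: _ => simp [hpieces] at hp

-- B's scanner equals the all-fold of B's per-part check over Python's split
theorem pv_go_scan (sep0 : Char) (srest : List Char) :
    ∀ (fuel : Nat) (l cur : List Char) (acc : List (List Char)), l.length < fuel →
      (PySem.Chars.splitOn.go (sep0 :: srest) fuel l cur acc).all pvPairOkB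
        = (acc.all pvPairOkB && pvScanB sep0 srest l cur.reverse) := by
  intro fuel
  induction fuel with
  | zero => intro l cur acc h; omega
  | succ f ih =>
    intro l cur acc h
    cases l with
    | nil =>
      simp [PySem.Chars.splitOn.go, pvScanB, Bool.and_comm]
    | cons c rest =>
      by_cases hpre : (sep0 :: srest).isPrefixOf (c :: rest) = true
      · rw [PySem.Chars.splitOn.go, if_pos hpre]
        have hlen : (List.drop (sep0 :: srest).length (c :: rest)).length < f := by
          simp at h ⊢; omega
        rw [ih _ [] (cur.reverse :: acc) hlen]
        rw [pvScanB, if_pos hpre]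
        simp only [List.length_cons, List.drop_succ_cons, List.all_cons, List.reverse_nil]
        cases acc.all pvPairOkB <;> cases pvPairOkB cur.reverse <;> simp
      · rw [PySem.Chars.splitOn.go, if_neg hpre]
        rw [ih rest (c :: cur) acc (by simp at h ⊢; omega)]
        rw [pvScanB, if_neg hpre]
        simp

theorem pv_scan_eq (sep0 : Char) (srest : List Char) (l : List Char) :
    pvScanB sep0 srest l [] = (PySem.Chars.splitOn l (sep0 :: srest)).all pvPairOkB := by
  rw [PySem.Chars.splitOn, pv_go_scan sep0 srest (l.length + 1) l [] [] (by omega)]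
  simp

-- ===== VERDICT (by name: the statements are the Claim_ definitions above) =====
theorem is_valid_media_query_spec : Claim_equal_is_valid_media_query := by
  intro query _ hpre
  unfold Spec_is_valid_media_query is_valid_media_query is_valid_media_query_alt pvPartsA
  cases hb : PySem.Chars.startswith query.toList "@media ".toList with
  | false => simp
  | true =>
    have hparts := hpre hb
    unfold pvPartsA at hparts
    simp only [not_true_eq_false, if_false, if_true]
    cases hand : PySem.Chars.isIn " and ".toList (PySem.Chars.slice query.toList (some 7) none) with
    | true =>
      rw [hand] at hparts
      simp only [if_true] at hparts ⊢
      rw [pv_loop_eq _ hparts, pv_scan_eq]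
      rfl
    | false =>
      rw [hand] at hparts
      simp only [Bool.false_eq_true, if_false] at hparts ⊢
      rw [pv_loop_eq _ hparts, pv_scan_eq]
      rfl

theorem is_valid_media_query_raises : Claim_raises_is_valid_media_query := by
  unfold Claim_raises_is_valid_media_query
  constructor
  · intro query _ hr hpre
    obtain ⟨hb, part, hmem, hlen⟩ := hr
    exact hlen (hpre hb part hmem)
  · refine ⟨by decide, by decide, ?_⟩
    show is_valid_media_query_alt "@media (foo)" = false
    rw [is_valid_media_query_alt, if_pos (by decide)]
    rw [if_neg (by decide), pv_scan_eq]
    decide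

-- self-check: the raise witness really lies inside Raises_ (projected from the theorem above)
theorem pvRaiseWitness_ok :
    Raises_is_valid_media_query pvRaiseWitness_is_valid_media_query :=
  is_valid_media_query_raises.2.2.1
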